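-- pv_equiv track=rewrite | github.com/dylan-buck/warhawk-toolkit | warhawk_toolkit/converters/ngp_to_obj.py | build_tris_trilist
-- ===== SOURCE A (Python) =====
-- from typing import Callable, Dict, Iterator, List, Optional, Tuple
--
-- def build_tris_trilist(indices: List[int]) -> List[Tuple[int, int, int]]:
--     """Build triangles from a triangle list (every 3 indices = 1 triangle)."""
--     tris = []
--     n = len(indices) - (len(indices) % 3)
--     for i in range(0, n, 3):
--         a, b, c = indices[i], indices[i + 1], indices[i + 2]
--         if a == b or b == c or a == c:
--             continue
--         tris.append((a, b, c))
--     return tris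
-- ===== SOURCE B (Python) =====
-- from typing import List, Tuple
--
-- def build_tris_trilist(indices: List[int]) -> List[Tuple[int, int, int]]:
--     """Build triangles from a triangle list (every 3 indices = 1 triangle).
--
--     Streaming state machine: consume the index stream one element at a time,
--     buffering pending vertices; each time the buffer fills to 3, emit the
--     triangle iff its corners are pairwise distinct and reset the buffer.
--     A trailing 1- or 2-vertex remainder simply stays in the buffer and is
--     discarded.
--     """
--     tris: List[Tuple[int, int, int]] = []
--     pending: List[int] = []
--     for x in indices:
--         pending.append(x)
--         if len(pending) == 3:
--             a, b, c = pending
--             if a != b and b != c and a != c: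
--                 tris.append((a, b, c))
--             pending = []
--     return tris
-- ===== Notes on version B (the rewrite author's own statement) =====
-- stated objective: alternative
-- what changed: Replaced the range-stepped index loop (random access at i, i+1, i+2 with a precomputed truncated bound) by a single element-wise streaming pass with a pending-vertex buffer: a triangle is emitted each time the buffer fills to three pairwise-distinct vertices, and the trailing remainder is discarded by never filling the buffer.
import Mathlib
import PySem

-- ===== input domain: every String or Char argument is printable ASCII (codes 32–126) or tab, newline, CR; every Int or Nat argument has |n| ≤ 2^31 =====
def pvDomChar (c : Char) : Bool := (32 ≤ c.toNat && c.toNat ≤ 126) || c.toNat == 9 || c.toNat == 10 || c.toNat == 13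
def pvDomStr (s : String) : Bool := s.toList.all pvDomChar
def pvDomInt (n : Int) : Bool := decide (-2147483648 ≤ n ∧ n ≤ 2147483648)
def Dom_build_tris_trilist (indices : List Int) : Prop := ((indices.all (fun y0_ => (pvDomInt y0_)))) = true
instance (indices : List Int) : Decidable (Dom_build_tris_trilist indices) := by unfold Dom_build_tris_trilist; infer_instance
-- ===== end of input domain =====

-- B replaces A's range-stepped index loop by a streaming state machine: one element-wise
-- pass with a pending-vertex buffer, emitting a triangle whenever the buffer fills with
-- three pairwise-distinct vertices (objective: alternative).

-- ===== PORT A =====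
def build_tris_trilist (indices : List Int) : List (Int × Int × Int) :=
  let n : Int := (indices.length : Int) - PySem.Int.mod (indices.length : Int) 3
  (PySem.List.pyRange 0 n 3).foldl
    (fun tris i =>
      -- indices[i], indices[i+1], indices[i+2]: always in range since i+2 < n ≤ len(indices)
      let a := PySem.List.pyGetD indices i 0
      let b := PySem.List.pyGetD indices (i + 1) 0
      let c := PySem.List.pyGetD indices (i + 2) 0
      if a == b || b == c || a == c then tris else tris ++ [(a, b, c)]) []

-- ===== PORT B =====
-- one step of the state machine: state = (tris so far, pending buffer of < 3 vertices)
def pvStepB (st : List (Int × Int × Int) × List Int) (x : Int) :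
    List (Int × Int × Int) × List Int :=
  let pending := st.2 ++ [x]
  if pending.length == 3 then
    match pending with
    | [a, b, c] => (if a ≠ b ∧ b ≠ c ∧ a ≠ c then st.1 ++ [(a, b, c)] else st.1, [])
    | _ => (st.1, [])   -- unreachable: pending has length 3
  else (st.1, pending)

def build_tris_trilist_alt (indices : List Int) : List (Int × Int × Int) :=
  (indices.foldl pvStepB ([], [])).1

-- ===== PRECONDITION & SPEC =====
def Spec_build_tris_trilist (indices : List Int) (out : List (Int × Int × Int)) : Prop := out = build_tris_trilist_alt indices
instance (indices : List Int) (out : List (Int × Int × Int)) : Decidable (Spec_build_tris_trilist indices out) := by unfold Spec_build_tris_trilist; infer_instance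

-- ===== CLAIM (what is proved, stated in full; the proofs are below) =====
def Claim_equal_build_tris_trilist : Prop := ∀ (indices : List Int), Dom_build_tris_trilist indices → Spec_build_tris_trilist indices (build_tris_trilist indices)

-- ===== LEMMAS AND PROOFS =====

-- common reference shape: consume three indices at a time, keep non-degenerate triples
def pvChunk3 : List Int → List (Int × Int × Int)
  | a :: b :: c :: t => (if a == b || b == c || a == c then [] else [(a, b, c)]) ++ pvChunk3 t
  | _ => []

-- ----- B = pvChunk3 -----
lemma loopB_eq_chunk3 : ∀ (t : List Int) (acc : List (Int × Int × Int)),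
    (t.foldl pvStepB (acc, [])).1 = acc ++ pvChunk3 t := by
  intro t
  induction t using pvChunk3.induct with
  | case1 a b c r ih =>
      intro acc
      have h3 : pvStepB (acc, [a, b]) c
          = (acc ++ (if a == b || b == c || a == c then [] else [(a, b, c)]), []) := by
        by_cases hab : a = b <;> by_cases hbc : b = c <;> by_cases hac : a = c <;>
          simp_all [pvStepB]
      simp only [List.foldl_cons]
      rw [show pvStepB (acc, []) a = (acc, [a]) from by simp [pvStepB],
          show pvStepB (acc, [a]) b = (acc, [a, b]) from by simp [pvStepB], h3, ih]
      rw [pvChunk3, List.append_assoc]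
  | case2 xs h1 =>
      intro acc
      match xs, h1 with
      | [], _ => simp [pvChunk3]
      | [a], _ => simp [pvChunk3, pvStepB]
      | [a, b], _ => simp [pvChunk3, pvStepB]
      | a :: b :: c :: t, h1 => exact (h1 a b c t rfl).elim

lemma alt_eq_chunk3 (xs : List Int) : build_tris_trilist_alt xs = pvChunk3 xs := by
  simpa using loopB_eq_chunk3 xs []

-- ----- A = pvChunk3 -----
-- A's loop body, reindexed over Nat: iteration j reads positions 3j, 3j+1, 3j+2
def pvBodyN (t : List Int) (tris : List (Int × Int × Int)) (j : Nat) : List (Int × Int × Int) :=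
  let a := t.getD (3 * j) 0
  let b := t.getD (3 * j + 1) 0
  let c := t.getD (3 * j + 2) 0
  if a == b || b == c || a == c then tris else tris ++ [(a, b, c)]

lemma pvBodyN_shift (a b c : Int) (r : List Int) (tris : List (Int × Int × Int)) (j : Nat) :
    pvBodyN (a :: b :: c :: r) tris (j + 1) = pvBodyN r tris j := by
  have e0 : 3 * (j + 1) = (3 * j) + 1 + 1 + 1 := by ring
  simp only [pvBodyN, e0, List.getD_cons_succ]

lemma loop_eq_chunk3 : ∀ (t : List Int) (acc : List (Int × Int × Int)),
    (List.range (t.length / 3)).foldl (pvBodyN t) acc = acc ++ pvChunk3 t := by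
  intro t
  induction t using pvChunk3.induct with
  | case1 a b c r ih =>
      intro acc
      have hlen : (a :: b :: c :: r).length / 3 = r.length / 3 + 1 := by
        simp [List.length_cons]; omega
      rw [hlen, List.range_succ_eq_map, List.foldl_cons, List.foldl_map]
      have hb : (fun (x : List (Int × Int × Int)) (y : Nat) => pvBodyN (a :: b :: c :: r) x y.succ)
          = pvBodyN r := by
        funext tris j
        exact pvBodyN_shift a b c r tris j
      rw [hb, ih]
      have h0 : pvBodyN (a :: b :: c :: r) acc 0
          = acc ++ (if a == b || b == c || a == c then [] else [(a, b, c)]) := by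
        cases h : (a == b || b == c || a == c) <;> simp [pvBodyN, h]
      rw [h0, pvChunk3, List.append_assoc]
  | case2 xs h1 =>
      intro acc
      match xs, h1 with
      | [], _ => simp [pvChunk3]
      | [a], _ => simp [pvChunk3]
      | [a, b], _ => simp [pvChunk3]
      | a :: b :: c :: t, h1 => exact (h1 a b c t rfl).elim

lemma a_eq_chunk3 (xs : List Int) : build_tris_trilist xs = pvChunk3 xs := by
  simp only [build_tris_trilist]
  have hm : PySem.Int.mod (xs.length : Int) 3 = ((xs.length % 3 : Nat) : Int) := by
    exact_mod_cast PySem.Int.mod_natCast xs.length 3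
  have hn : (xs.length : Int) - PySem.Int.mod (xs.length : Int) 3
      = ((xs.length - xs.length % 3 : Nat) : Int) := by
    rw [hm]; omega
  rw [hn, PySem.List.pyRange_of_pos 0 _ (by norm_num : (0:Int) < 3)]
  have hK : (if (0:Int) < ((xs.length - xs.length % 3 : Nat) : Int)
      then ((((xs.length - xs.length % 3 : Nat) : Int) - 0 + 3 - 1) / 3).toNat else 0)
      = xs.length / 3 := by
    split_ifs <;> omega
  rw [hK, List.foldl_map]
  have hb : (fun (tris : List (Int × Int × Int)) (k : Nat) =>
        let a := PySem.List.pyGetD xs (0 + 3 * (k : Int)) 0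
        let b := PySem.List.pyGetD xs (0 + 3 * (k : Int) + 1) 0
        let c := PySem.List.pyGetD xs (0 + 3 * (k : Int) + 2) 0
        if a == b || b == c || a == c then tris else tris ++ [(a, b, c)])
      = pvBodyN xs := by
    funext tris k
    have e0 : (0 + 3 * (k : Int)) = ((3 * k : Nat) : Int) := by push_cast; ring
    have e1 : ((3 * k : Nat) : Int) + 1 = ((3 * k + 1 : Nat) : Int) := by push_cast; ring
    have e2 : ((3 * k : Nat) : Int) + 2 = ((3 * k + 2 : Nat) : Int) := by push_cast; ring
    simp only [pvBodyN, e0, e1, e2, PySem.List.pyGetD_natCast]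
  rw [hb, loop_eq_chunk3 xs []]
  simp

-- ===== VERDICT (by name: the statement is the Claim_ definition above) =====
theorem build_tris_trilist_spec : Claim_equal_build_tris_trilist := by
  intro xs _
  unfold Spec_build_tris_trilist
  rw [a_eq_chunk3, alt_eq_chunk3]
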